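-- pv_equiv track=rewrite | github.com/Bol-C14/EEsizer | src/eesizer_core/operators/report_plots.py | _replace_section
-- ===== SOURCE A (Python) =====
-- def _replace_section(lines: list[str], heading: str, new_section: list[str]) -> list[str]:
--     if not new_section:
--         return lines
--     try:
--         start = lines.index(heading)
--     except ValueError:
--         if lines and lines[-1].strip():
--             lines.append("")
--         return lines + new_section
--
--     end = len(lines)
--     for idx in range(start + 1, len(lines)):
--         if lines[idx].startswith("## "):
--             end = idx
--             break
--     return lines[:start] + new_section + lines[end:]
-- ===== SOURCE B (Python) =====
-- def _replace_section(lines: list[str], heading: str, new_section: list[str]) -> list[str]: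
--     if not new_section:
--         return lines
--     out = []
--     found = False
--     skipping = False
--     for line in lines:
--         if not found and line == heading:
--             out.extend(new_section)
--             found = True
--             skipping = True
--         elif skipping:
--             if line.startswith("## "):
--                 out.append(line)
--                 skipping = False
--         else:
--             out.append(line)
--     if found:
--         return out
--     if lines and lines[-1].strip():
--         lines.append("")
--         out.append("")
--     return out + new_section
-- ===== Notes on version B (the rewrite author's own statement) =====
-- stated objective: alternative
-- what changed: Replaces A's index()-then-bounded-scan-then-three-way-slice-splice with a single linear pass over lines using found/skipping flags that copies, substitutes the section at the heading, and drops lines until the next '## ' boundary.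
import Mathlib
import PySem

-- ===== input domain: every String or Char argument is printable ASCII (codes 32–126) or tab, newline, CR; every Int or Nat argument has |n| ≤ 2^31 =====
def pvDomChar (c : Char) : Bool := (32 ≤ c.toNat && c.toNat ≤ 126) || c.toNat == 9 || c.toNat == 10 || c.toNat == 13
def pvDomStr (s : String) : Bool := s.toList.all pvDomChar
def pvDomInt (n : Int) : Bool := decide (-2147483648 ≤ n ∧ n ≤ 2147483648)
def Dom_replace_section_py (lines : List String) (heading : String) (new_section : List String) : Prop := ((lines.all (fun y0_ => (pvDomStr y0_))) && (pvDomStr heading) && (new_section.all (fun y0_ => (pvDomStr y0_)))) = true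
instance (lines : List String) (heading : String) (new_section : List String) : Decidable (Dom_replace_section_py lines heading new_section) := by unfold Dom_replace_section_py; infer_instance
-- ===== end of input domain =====

-- B replaces A's index()/bounded-scan/slice-splice with one linear pass using found/skipping flags;
-- same return value everywhere (B also performs A's in-place append('') mutation in the not-found fallback).

-- ===== PORT A =====
-- the 'for idx in range(start+1, len(lines)): if lines[idx].startswith("## "): end = idx; break' loop
def pvFindEnd (lines : List String) (idx : Nat) : Nat :=
  if h : idx < lines.length then
    if PySem.Str.startswith lines[idx] "## " then idx else pvFindEnd lines (idx + 1)
  else lines.length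
termination_by lines.length - idx

def replace_section_py (lines : List String) (heading : String) (new_section : List String) : List String :=
  if new_section = [] then lines
  else
    match PySem.List.index? lines heading with
    | none =>
        -- except ValueError branch: possible lines.append("")
        let lines' := if lines ≠ [] ∧ PySem.Str.strip (lines.getLast!) ≠ "" then lines ++ [""] else lines
        lines' ++ new_section
    | some start =>
        let «end» := pvFindEnd lines (start + 1)
        lines.take start ++ new_section ++ lines.drop «end»

-- ===== PORT B =====
-- one step of B's loop; state = (out, found, skipping)
def pvAltStep (heading : String) (new_section : List String)
    (s : List String × Bool × Bool) (line : String) : List String × Bool × Bool :=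
  let (out, found, skipping) := s
  if !found && line == heading then (out ++ new_section, true, true)
  else if skipping then
    if PySem.Str.startswith line "## " then (out ++ [line], found, false) else (out, found, skipping)
  else (out ++ [line], found, skipping)

def replace_section_py_alt (lines : List String) (heading : String) (new_section : List String) : List String :=
  if new_section = [] then lines
  else
    let st := lines.foldl (pvAltStep heading new_section) ([], false, false)
    if st.2.1 then st.1
    else
      let out := if lines ≠ [] ∧ PySem.Str.strip (lines.getLast!) ≠ "" then st.1 ++ [""] else st.1
      out ++ new_section

-- ===== PRECONDITION & SPEC =====
def Spec_replace_section_py (lines : List String) (heading : String) (new_section : List String) (out : List String) : Prop := out = replace_section_py_alt lines heading new_section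
instance (lines : List String) (heading : String) (new_section : List String) (out : List String) : Decidable (Spec_replace_section_py lines heading new_section out) := by unfold Spec_replace_section_py; infer_instance

-- ===== CLAIM (what is proved, stated in full; the proofs are below) =====
def Claim_equal_replace_section_py : Prop := ∀ (lines : List String) (heading : String) (new_section : List String), Dom_replace_section_py lines heading new_section → Spec_replace_section_py lines heading new_section (replace_section_py lines heading new_section)

-- ===== LEMMAS AND PROOFS =====

-- B's fold over lines not containing the heading just copies
theorem pvAlt_fold_no_heading (heading : String) (new_section : List String)
    (xs : List String) (out : List String) (hx : heading ∉ xs) :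
    xs.foldl (pvAltStep heading new_section) (out, false, false) = (out ++ xs, false, false) := by
  induction xs generalizing out with
  | nil => simp
  | cons x xs ih =>
    have hne : ¬ (x == heading) = true := by
      simp only [beq_iff_eq]; rintro rfl; exact hx (List.mem_cons_self)
    have hx' : heading ∉ xs := fun h => hx (List.mem_cons_of_mem _ h)
    simp only [List.foldl_cons, pvAltStep, hne, Bool.not_false, Bool.true_and,
      Bool.false_eq_true, if_false]
    rw [ih (out ++ [x]) hx']
    simp

-- B's fold in (found, not skipping) state copies everything
theorem pvAlt_fold_copy (heading : String) (new_section : List String)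
    (xs : List String) (out : List String) :
    xs.foldl (pvAltStep heading new_section) (out, true, false) = (out ++ xs, true, false) := by
  induction xs generalizing out with
  | nil => simp
  | cons x xs ih =>
    simp only [List.foldl_cons, pvAltStep, Bool.not_true, Bool.false_and,
      Bool.false_eq_true, if_false]
    rw [ih (out ++ [x])]
    simp

-- the found flag, once true, stays true
@[simp] theorem pvAlt_fold_found (heading : String) (new_section : List String)
    (xs : List String) (out : List String) (sk : Bool) :
    ((xs.foldl (pvAltStep heading new_section) (out, true, sk)).2.1) = true := by
  induction xs generalizing out sk with
  | nil => rfl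
  | cons x xs ih =>
    simp only [List.foldl_cons, pvAltStep]
    split_ifs <;> apply ih

-- B's fold in skipping state drops until the first '## ' line, then copies
theorem pvAlt_fold_skip (heading : String) (new_section : List String)
    (xs : List String) (out : List String) :
    ((xs.foldl (pvAltStep heading new_section) (out, true, true)).1)
      = out ++ xs.dropWhile (fun l => !(PySem.Str.startswith l "## ")) := by
  induction xs generalizing out with
  | nil => simp
  | cons x xs ih =>
    by_cases hs : PySem.Str.startswith x "## " = true
    all_goals simp [PySem.Str.startswith_eq] at hs
    · simp [pvAltStep, hs, pvAlt_fold_copy, List.dropWhile]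
    · simp [pvAltStep, hs, ih, List.dropWhile]

-- A's end-scan then drop = dropWhile on the suffix after the heading
theorem pvFindEnd_drop (pre rest : List String) :
    (pre ++ rest).drop (pvFindEnd (pre ++ rest) pre.length)
      = rest.dropWhile (fun l => !(PySem.Str.startswith l "## ")) := by
  induction rest generalizing pre with
  | nil => simp [pvFindEnd]
  | cons x xs ih =>
    rw [pvFindEnd]
    have hlt : pre.length < (pre ++ x :: xs).length := by simp
    rw [dif_pos hlt]
    have hget : (pre ++ x :: xs)[pre.length] = x := by
      rw [List.getElem_append_right (Nat.le_refl _)]; simp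
    rw [hget]
    by_cases hs : PySem.Str.startswith x "## " = true
    · simp only [if_pos hs]
      simp [PySem.Str.startswith_eq] at hs
      simp [hs, List.dropWhile]
    · have heq : pre ++ x :: xs = (pre ++ [x]) ++ xs := by simp
      rw [if_neg hs]
      have h2 : pre.length + 1 = (pre ++ [x]).length := by simp
      rw [heq, h2, ih (pre ++ [x])]
      simp [PySem.Str.startswith_eq] at hs
      simp [List.dropWhile, hs]

-- ===== VERDICT (by name: the statement is the Claim_ definition above) =====
theorem replace_section_py_spec : Claim_equal_replace_section_py := by
  intro lines heading new_section _
  unfold Spec_replace_section_py replace_section_py replace_section_py_alt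
  by_cases hns : new_section = []
  · simp [hns]
  · rw [if_neg hns, if_neg hns]
    cases hidx : PySem.List.index? lines heading with
    | none =>
      have hnotin : heading ∉ lines := (PySem.List.index?_eq_none_iff _ _).1 hidx
      rw [pvAlt_fold_no_heading heading new_section lines [] hnotin]
      simp
    | some start =>
      obtain ⟨pre, suf, hsplit, hlen, hpre⟩ := (PySem.List.index?_eq_some_iff _ _ _).1 hidx
      subst hlen
      subst hsplit
      have hdrop : (pre ++ heading :: suf).drop (pvFindEnd (pre ++ heading :: suf) (pre.length + 1))
          = suf.dropWhile (fun l => !(PySem.Str.startswith l "## ")) := by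
        have e1 : pre ++ heading :: suf = (pre ++ [heading]) ++ suf := by simp
        have e2 : pre.length + 1 = (pre ++ [heading]).length := by simp
        rw [e1, e2, pvFindEnd_drop]
      have hfold1 : (pre ++ heading :: suf).foldl (pvAltStep heading new_section) ([], false, false)
          = suf.foldl (pvAltStep heading new_section) (pre ++ new_section, true, true) := by
        rw [List.foldl_append, pvAlt_fold_no_heading heading new_section pre [] hpre]
        simp [pvAltStep]
      rw [hfold1]
      simp only [pvAlt_fold_found, pvAlt_fold_skip, hdrop, if_true]
      simp
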